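-- pv_equiv track=rewrite | github.com/nicedayzhu/hw-exam-code | 密码强度等级.py | calNum
-- ===== SOURCE A (Python) =====
-- def calNum(ls):
--     num_count_flag = 0 # 默认当前数字个数为0
--     point_num = 0
--     for item in ls:
--         if not num_count_flag:
--             if (ord(item)>47) and (ord(item)<58):
--                 point_num = 10
--                 num_count_flag = 1 # 当前已存在一个数字
--         else:
--             # 判断数字个数是否大于1个，如果是，得分为20
--             if (ord(item)>47) and (ord(item)<58):
--                 point_num = 20
--     return point_num
-- ===== SOURCE B (Python) =====
-- def calNum(ls):
--     def rest_after_first_digit(items):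
--         # returns the suffix after the first digit, or None if there is no digit
--         for i, item in enumerate(items):
--             if ord(item) > 47 and ord(item) < 58:
--                 return items[i+1:]
--         return None
--     rest = rest_after_first_digit(ls)
--     if rest is None:
--         return 0
--     if rest_after_first_digit(rest) is None:
--         return 10
--     return 20
-- ===== Notes on version B (the rewrite author's own statement) =====
-- stated objective: alternative
-- what changed: Replaces A's single full scan with a flag state machine by two staged short-circuiting searches: locate the first digit and take the suffix after it, then search that suffix for a second digit, mapping (none, one, two found) to 0/10/20.
import Mathlib
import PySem

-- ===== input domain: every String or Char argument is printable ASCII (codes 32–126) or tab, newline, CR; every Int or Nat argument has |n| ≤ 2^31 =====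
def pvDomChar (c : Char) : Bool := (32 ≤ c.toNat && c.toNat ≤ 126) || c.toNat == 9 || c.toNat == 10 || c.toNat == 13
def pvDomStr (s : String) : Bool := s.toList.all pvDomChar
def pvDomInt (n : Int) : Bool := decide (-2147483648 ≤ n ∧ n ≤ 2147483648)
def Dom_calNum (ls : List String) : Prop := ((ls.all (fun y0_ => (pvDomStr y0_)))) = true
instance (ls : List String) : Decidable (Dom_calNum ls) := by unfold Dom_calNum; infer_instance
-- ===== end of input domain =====

-- B replaces A's flag state machine by two staged short-circuiting searches (first digit, then a second digit in the suffix after it).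

-- ord(item): Python raises TypeError unless item is a single character; Pre_ restricts to
-- length-1 strings, on which this (headD ' ' as a total stand-in) is exact.
def pvOrd (s : String) : Int := (s.toList.headD ' ').toNat

-- ===== PORT A =====
def calNum (ls : List String) : Int :=
  (ls.foldl (fun (st : Int × Int) item =>
      if st.1 == 0 then
        if pvOrd item > 47 ∧ pvOrd item < 58 then (1, 10) else st
      else
        if pvOrd item > 47 ∧ pvOrd item < 58 then (st.1, 20) else st)
    (0, 0)).2

-- ===== PORT B =====
-- Source B's helper: the suffix after the first digit, or none if there is no digit.
def restAfterFirstDigit : List String → Option (List String)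
  | [] => none
  | item :: xs => if pvOrd item > 47 ∧ pvOrd item < 58 then some xs else restAfterFirstDigit xs

def calNum_alt (ls : List String) : Int :=
  match restAfterFirstDigit ls with
  | none => 0
  | some rest =>
    match restAfterFirstDigit rest with
    | none => 10
    | some _ => 20

-- ===== PRECONDITION & SPEC =====
-- Pre_ excludes exactly the lists containing a string of length ≠ 1, on which Python's ord raises TypeError in A.
def Pre_calNum (ls : List String) : Prop := (ls.all (fun s => s.length == 1)) = true
instance (ls : List String) : Decidable (Pre_calNum ls) := by unfold Pre_calNum; infer_instance
def pvWitness_calNum : List String := (["a", "5", "!", "7", "7"])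
def Spec_calNum (ls : List String) (out : Int) : Prop := out = calNum_alt ls
instance (ls : List String) (out : Int) : Decidable (Spec_calNum ls out) := by unfold Spec_calNum; infer_instance

-- ===== CLAIM (what is proved, stated in full; the proofs are below) =====
def Claim_equal_calNum : Prop := ∀ (ls : List String), Dom_calNum ls → Pre_calNum ls → Spec_calNum ls (calNum ls)

-- ===== LEMMAS AND PROOFS =====
-- Once A's flag is 1 with score p ∈ {10,20}, the rest of the scan yields p if no further digit, else 20.
theorem calNum_loop_flag1 (ls : List String) : ∀ (p : Int),
    (ls.foldl (fun (st : Int × Int) item =>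
        if st.1 == 0 then
          if pvOrd item > 47 ∧ pvOrd item < 58 then (1, 10) else st
        else
          if pvOrd item > 47 ∧ pvOrd item < 58 then (st.1, 20) else st)
      (1, p)).2
    = match restAfterFirstDigit ls with
      | none => p
      | some _ => 20 := by
  induction ls with
  | nil => intro p; simp [restAfterFirstDigit]
  | cons x xs ih =>
    intro p
    by_cases hd : pvOrd x > 47 ∧ pvOrd x < 58
    · simp only [List.foldl, restAfterFirstDigit, if_pos hd]
      rw [if_neg (by norm_num : ¬ (((1 : Int), p).1 == 0) = true)]
      rw [ih 20]
      cases restAfterFirstDigit xs <;> rfl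
    · simp only [List.foldl, restAfterFirstDigit, if_neg hd]
      rw [if_neg (by norm_num : ¬ (((1 : Int), p).1 == 0) = true)]
      exact ih p

theorem calNum_loop_flag0 (ls : List String) :
    (ls.foldl (fun (st : Int × Int) item =>
        if st.1 == 0 then
          if pvOrd item > 47 ∧ pvOrd item < 58 then (1, 10) else st
        else
          if pvOrd item > 47 ∧ pvOrd item < 58 then (st.1, 20) else st)
      (0, 0)).2 = calNum_alt ls := by
  induction ls with
  | nil => simp [calNum_alt, restAfterFirstDigit]
  | cons x xs ih =>
    by_cases hd : pvOrd x > 47 ∧ pvOrd x < 58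
    · simp only [List.foldl, beq_self_eq_true, if_pos, if_pos hd]
      rw [calNum_loop_flag1 xs 10]
      simp [calNum_alt, restAfterFirstDigit, if_pos hd]
    · simp only [List.foldl, beq_self_eq_true, if_pos, if_neg hd]
      rw [ih]
      simp [calNum_alt, restAfterFirstDigit, if_neg hd]

-- ===== VERDICT (by name: the statement is the Claim_ definition above) =====
theorem calNum_spec : Claim_equal_calNum := by
  intro ls _ _
  unfold Spec_calNum calNum
  exact calNum_loop_flag0 ls
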